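-- pv_equiv track=rewrite | github.com/FunmiKesa/image-selector | utils.py | remove_common_beginning
-- ===== SOURCE A (Python) =====
-- def remove_common_beginning(str1, str2):
--     """
--     Strip out the common part at the start of both str1 and str2
--
--     >>> remove_common_beginning('chalk', 'cheese')
--     ('alk', 'eese')
--
--     >>> remove_common_beginning('/common/path/to/a/b/c', '/common/path/to/d/e/f/')
--     ('a/b/c', 'd/e/f/')
--
--     Known failure, should return: ('same', '')
--     >>> remove_common_beginning('samesame', 'same')
--     ('', '')
--     """
--
--     common = ''
--     for i, s in enumerate(str1):
--         if str2.startswith(str1[:i+1]):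
--             common = str1[:i+1]
--         else:
--             break
--
--     if len(common) > 0:
--         return str1.split(common)[1], str2.split(common)[1]
--     else:
--         return str1, str2
-- ===== SOURCE B (Python) =====
-- def remove_common_beginning(str1, str2):
--     i = 0
--     while i < len(str1) and i < len(str2) and str1[i] == str2[i]:
--         i += 1
--     return str1[i:], str2[i:]
-- ===== Notes on version B (the rewrite author's own statement) =====
-- stated objective: faster
-- what changed: B finds the common prefix by a single char-by-char scan and strips it with slicing, instead of A's quadratic re-slicing str1[:i+1] with startswith at every index followed by str.split on the prefix.
-- intended difference: When the nonempty longest common prefix occurs again later in either string, A's str.split on that prefix cuts each remainder short at its next occurrence (the function's docstring itself calls this a 'Known failure'), while B returns the full remainders after the prefix, which is the intended value. — e.g. on remove_common_beginning("samesame", "same"): A returns ("", ""), B returns ("same", "")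
import Mathlib
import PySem

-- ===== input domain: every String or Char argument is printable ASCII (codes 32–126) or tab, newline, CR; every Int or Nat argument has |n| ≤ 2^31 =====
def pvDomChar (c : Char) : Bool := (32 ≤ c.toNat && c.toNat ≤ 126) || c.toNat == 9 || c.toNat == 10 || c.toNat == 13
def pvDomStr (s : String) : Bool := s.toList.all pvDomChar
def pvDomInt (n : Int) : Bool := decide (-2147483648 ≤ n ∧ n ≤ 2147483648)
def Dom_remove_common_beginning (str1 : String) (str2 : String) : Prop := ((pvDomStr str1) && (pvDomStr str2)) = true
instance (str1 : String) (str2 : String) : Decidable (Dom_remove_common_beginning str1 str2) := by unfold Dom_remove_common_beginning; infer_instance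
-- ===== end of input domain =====

-- B replaces A's quadratic prefix-probing loop (str1[:i+1] + startswith at every index) and
-- str.split on the prefix by one char-by-char scan and two slices (objective: faster).

-- ===== PORT A =====
-- the 'for i, s in enumerate(str1): …' loop with its break; 'common' is the accumulator
def pvLoopA (str1 str2 : String) : List (Int × Char) → String → String
  | [], common => common
  | (i, _) :: rest, common =>
    if PySem.Str.startswith str2 (PySem.Str.slice str1 none (some (i + 1))) then
      pvLoopA str1 str2 rest (PySem.Str.slice str1 none (some (i + 1)))
    else common

def remove_common_beginning (str1 : String) (str2 : String) : String × String :=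
  let common := pvLoopA str1 str2 (PySem.List.enumerate str1.toList 0) ""
  if PySem.Str.len common > 0 then
    -- '.getD' only makes the [1]-indexing total: common is a nonempty prefix of both strings,
    -- so split produces at least two pieces and Python never raises here
    (((PySem.Str.split? str1 common).getD []).getD 1 "",
     ((PySem.Str.split? str2 common).getD []).getD 1 "")
  else
    (str1, str2)

-- ===== PORT B =====
-- Source B's while loop: the length of the longest common prefix, scanned char by char
def pvLcpLen : List Char → List Char → Nat
  | a :: as, b :: bs => if a = b then pvLcpLen as bs + 1 else 0
  | _, _ => 0

def remove_common_beginning_alt (str1 : String) (str2 : String) : String × String :=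
  let i : Nat := pvLcpLen str1.toList str2.toList
  (PySem.Str.slice str1 (some (i : Int)) none, PySem.Str.slice str2 (some (i : Int)) none)

-- ===== PRECONDITION & SPEC =====
-- longest-common-prefix length, stated independently of either port (zip + takeWhile)
def pvCommonLen (s1 s2 : List Char) : Nat :=
  ((s1.zip s2).takeWhile (fun p => p.1 == p.2)).length

-- When the nonempty longest common prefix occurs again later in either string, A's str.split on that
-- prefix cuts each remainder short at its next occurrence (the function's docstring itself calls this a
-- 'Known failure'), while B returns the full remainders after the prefix, which is the intended value.
def D_remove_common_beginning (str1 : String) (str2 : String) : Prop :=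
  0 < pvCommonLen str1.toList str2.toList ∧
    (str1.toList.take (pvCommonLen str1.toList str2.toList) <:+: str1.toList.drop (pvCommonLen str1.toList str2.toList) ∨
     str1.toList.take (pvCommonLen str1.toList str2.toList) <:+: str2.toList.drop (pvCommonLen str1.toList str2.toList))
instance (str1 : String) (str2 : String) : Decidable (D_remove_common_beginning str1 str2) := by
  unfold D_remove_common_beginning; infer_instance

def Spec_remove_common_beginning (str1 : String) (str2 : String) (out : String × String) : Prop :=
  ¬ D_remove_common_beginning str1 str2 → out = remove_common_beginning_alt str1 str2
instance (str1 : String) (str2 : String) (out : String × String) : Decidable (Spec_remove_common_beginning str1 str2 out) := by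
  unfold Spec_remove_common_beginning; infer_instance

def pvDiffWitness_remove_common_beginning : String × String := ("samesame", "same")
def pvDiffWitnessOut_remove_common_beginning : (String × String) × (String × String) := (("", ""), ("same", ""))

-- ===== CLAIM (what is proved, stated in full; the proofs are below) =====
def Claim_unchanged_remove_common_beginning : Prop := ∀ (str1 : String) (str2 : String), Dom_remove_common_beginning str1 str2 → Spec_remove_common_beginning str1 str2 (remove_common_beginning str1 str2)
def Claim_changed_remove_common_beginning : Prop := Dom_remove_common_beginning (pvDiffWitness_remove_common_beginning.1) (pvDiffWitness_remove_common_beginning.2) ∧ D_remove_common_beginning (pvDiffWitness_remove_common_beginning.1) (pvDiffWitness_remove_common_beginning.2) ∧ remove_common_beginning (pvDiffWitness_remove_common_beginning.1) (pvDiffWitness_remove_common_beginning.2) = pvDiffWitnessOut_remove_common_beginning.1 ∧ remove_common_beginning_alt (pvDiffWitness_remove_common_beginning.1) (pvDiffWitness_remove_common_beginning.2) = pvDiffWitnessOut_remove_common_beginning.2 ∧ pvDiffWitnessOut_remove_common_beginning.1 ≠ pvDiffWitnessOut_remove_common_beginning.2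
def Claim_exact_remove_common_beginning : Prop := ∀ (str1 : String) (str2 : String), Dom_remove_common_beginning str1 str2 → D_remove_common_beginning str1 str2 → remove_common_beginning str1 str2 ≠ remove_common_beginning_alt str1 str2

-- ===== LEMMAS AND PROOFS =====

theorem pvCommonLen_eq_pvLcpLen (s1 s2 : List Char) : pvCommonLen s1 s2 = pvLcpLen s1 s2 := by
  induction s1 generalizing s2 with
  | nil => cases s2 <;> simp [pvCommonLen, pvLcpLen]
  | cons a as ih =>
    cases s2 with
    | nil => simp [pvCommonLen, pvLcpLen]
    | cons b bs =>
      simp only [pvCommonLen, pvLcpLen, List.zip_cons_cons, List.takeWhile]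
      by_cases hab : a = b
      · subst hab
        simpa [pvCommonLen] using ih bs
      · have : (a == b) = false := by simp [hab]
        simp [this, hab]

theorem pvLcpLen_le_left (s1 s2 : List Char) : pvLcpLen s1 s2 ≤ s1.length := by
  induction s1 generalizing s2 with
  | nil => simp [pvLcpLen]
  | cons a as ih =>
    cases s2 with
    | nil => simp [pvLcpLen]
    | cons b bs =>
      simp only [pvLcpLen]
      split_ifs with h
      · simpa using ih bs
      · simp

theorem pvLcpLen_le_right (s1 s2 : List Char) : pvLcpLen s1 s2 ≤ s2.length := by
  induction s1 generalizing s2 with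
  | nil => simp [pvLcpLen]
  | cons a as ih =>
    cases s2 with
    | nil => simp [pvLcpLen]
    | cons b bs =>
      simp only [pvLcpLen]
      split_ifs with h
      · simpa using ih bs
      · simp

theorem pvLcpLen_take_eq (s1 s2 : List Char) :
    s1.take (pvLcpLen s1 s2) = s2.take (pvLcpLen s1 s2) := by
  induction s1 generalizing s2 with
  | nil => cases s2 <;> simp [pvLcpLen]
  | cons a as ih =>
    cases s2 with
    | nil => simp [pvLcpLen]
    | cons b bs =>
      simp only [pvLcpLen]
      split_ifs with h
      · subst h; simp [List.take_succ_cons, ih bs]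
      · simp

-- str2.startswith(str1[:m]) ↔ m ≤ lcp, for m ≤ len(str1)
theorem pvTake_prefix_iff (s1 s2 : List Char) (m : Nat) (hm : m ≤ s1.length) :
    s1.take m <+: s2 ↔ m ≤ pvLcpLen s1 s2 := by
  induction s1 generalizing s2 m with
  | nil => simp_all
  | cons a as ih =>
    cases m with
    | zero => simp
    | succ m' =>
      cases s2 with
      | nil =>
        rw [List.prefix_nil]
        simp [pvLcpLen]
      | cons b bs =>
        simp only [List.take_succ_cons, pvLcpLen, List.cons_prefix_cons]
        split_ifs with hab
        · subst hab
          have hih := ih bs m' (by simpa using hm)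
          constructor
          · rintro ⟨_, hp⟩; have := hih.mp hp; omega
          · intro h; exact ⟨rfl, hih.mpr (by omega)⟩
        · exact ⟨fun h => absurd h.1 hab, fun h => by omega⟩

-- the loop, started at position j ≤ lcp with common = str1[:j], ends with common = str1[:lcp]
theorem pvLoopA_eq_aux (str1 str2 : String) (n : Nat) :
    ∀ j : Nat, str1.toList.length - j = n → j ≤ pvLcpLen str1.toList str2.toList →
    pvLoopA str1 str2 (PySem.List.enumerate (str1.toList.drop j) (j : Int))
        (String.ofList (str1.toList.take j))
      = String.ofList (str1.toList.take (pvLcpLen str1.toList str2.toList)) := by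
  induction n with
  | zero =>
    intro j hn hj
    have hkle := pvLcpLen_le_left str1.toList str2.toList
    have hj' : j = pvLcpLen str1.toList str2.toList := by omega
    have hnil : str1.toList.drop j = [] := List.drop_eq_nil_of_le (by omega)
    rw [hnil, hj']
    simp [PySem.List.enumerate, pvLoopA]
  | succ n ihn =>
    intro j hn hj
    have hkle := pvLcpLen_le_left str1.toList str2.toList
    have hjlt : j < str1.toList.length := by omega
    obtain ⟨c, rest, hrest⟩ : ∃ c rest, str1.toList.drop j = c :: rest := by
      cases h : str1.toList.drop j with
      | nil => exact absurd (List.drop_eq_nil_iff.mp h) (by omega)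
      | cons c rest => exact ⟨c, rest, rfl⟩
    rw [hrest, PySem.List.enumerate_cons, pvLoopA]
    have hslice : PySem.Str.slice str1 none (some ((j : Int) + 1))
        = String.ofList (str1.toList.take (j + 1)) := by
      apply String.toList_injective
      rw [PySem.Str.toList_slice, PySem.Chars.slice_eq_listSlice,
        show ((j : Int) + 1) = ((j + 1 : Nat) : Int) from by push_cast; ring,
        PySem.List.slice_to_natCast]
      simp
    have hsw : PySem.Str.startswith str2 (PySem.Str.slice str1 none (some ((j : Int) + 1)))
        = decide (j + 1 ≤ pvLcpLen str1.toList str2.toList) := by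
      rw [hslice]
      rcases Classical.em (j + 1 ≤ pvLcpLen str1.toList str2.toList) with h | h
      · simp only [h, decide_true]
        rw [PySem.Str.startswith_eq,
          show (String.ofList (str1.toList.take (j+1))).toList = str1.toList.take (j+1) from by simp]
        exact (PySem.Chars.startswith_iff _ _).mpr
          ((pvTake_prefix_iff str1.toList str2.toList (j+1) (by omega)).mpr h)
      · simp only [h, decide_false]
        rw [PySem.Str.startswith_eq,
          show (String.ofList (str1.toList.take (j+1))).toList = str1.toList.take (j+1) from by simp]
        apply Bool.eq_false_iff.mpr
        intro hc
        have := (pvTake_prefix_iff str1.toList str2.toList (j+1) (by omega)).mp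
          ((PySem.Chars.startswith_iff _ _).mp hc)
        omega
    rw [hsw]
    rcases Classical.em (j + 1 ≤ pvLcpLen str1.toList str2.toList) with h | h
    · simp only [h, decide_true, if_pos]
      have hdrop : rest = str1.toList.drop (j + 1) := by
        have := congrArg List.tail hrest
        simpa [List.tail_drop] using this.symm
      have hrec := ihn (j + 1) (by omega) h
      rw [hslice, hdrop, show (j : Int) + 1 = ((j + 1 : Nat) : Int) from by push_cast; ring]
      exact hrec
    · have hjk : j = pvLcpLen str1.toList str2.toList := by omega
      simp only [show ¬ (j + 1 ≤ pvLcpLen str1.toList str2.toList) from h, decide_false,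
        Bool.false_eq_true, if_false]
      rw [hjk]

theorem pvLoopA_eq (str1 str2 : String) :
    pvLoopA str1 str2 (PySem.List.enumerate str1.toList 0) ""
      = String.ofList (str1.toList.take (pvLcpLen str1.toList str2.toList)) := by
  have := pvLoopA_eq_aux str1 str2 str1.toList.length 0 (by omega) (by omega)
  simpa using this

-- splitOn.go over a list with no occurrence of sep just copies it into the current chunk
theorem pvSplitGo_no_occur (sep : List Char) (fuel : Nat) :
    ∀ (l cur : List Char) (acc : List (List Char)), ¬ sep <:+: l →
      PySem.Chars.splitOn.go sep fuel l cur acc = ((cur.reverse ++ l) :: acc).reverse := by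
  induction fuel with
  | zero => intro l cur acc _; rw [PySem.Chars.splitOn.go]
  | succ n ih =>
    intro l cur acc hno
    cases l with
    | nil => rw [PySem.Chars.splitOn.go] <;> simp
    | cons c rest =>
      rw [PySem.Chars.splitOn.go]
      have hpref : sep.isPrefixOf (c :: rest) = false := by
        apply Bool.eq_false_iff.mpr
        intro h
        exact hno (List.IsPrefix.isInfix (List.isPrefixOf_iff_prefix.mp h))
      rw [hpref]
      simp only [Bool.false_eq_true, if_false]
      have hno' : ¬ sep <:+: rest := fun h => hno (List.infix_cons h)
      rw [ih rest (c :: cur) acc hno']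
      simp

-- split on a nonempty prefix that does not reoccur in the remainder gives exactly ['', rest]
theorem pvSplitOn_prefix (sep rest : List Char) (hsep : sep ≠ []) (hno : ¬ sep <:+: rest) :
    PySem.Chars.splitOn (sep ++ rest) sep = [[], rest] := by
  obtain ⟨c, sep', rfl⟩ : ∃ c sep', sep = c :: sep' := by
    cases sep with
    | nil => exact absurd rfl hsep
    | cons c sep' => exact ⟨c, sep', rfl⟩
  show PySem.Chars.splitOn.go _ (((c :: sep') ++ rest).length + 1) _ [] [] = _
  rw [show ((c :: sep') ++ rest : List Char) = c :: (sep' ++ rest) by simp]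
  rw [PySem.Chars.splitOn.go]
  have hpref : (c :: sep').isPrefixOf (c :: (sep' ++ rest)) = true := by
    rw [List.isPrefixOf_iff_prefix]
    exact ⟨rest, by simp⟩
  rw [hpref]
  simp only [if_true, List.reverse_nil]
  have hdrop : List.drop (c :: sep').length (c :: (sep' ++ rest)) = rest := by
    simp
  rw [hdrop]
  rw [pvSplitGo_no_occur _ _ rest [] [[]] hno]
  simp

theorem pvSplitOn_of_eq (l sep rest : List Char) (hsep : sep ≠ []) (hno : ¬ sep <:+: rest)
    (h : l = sep ++ rest) : PySem.Chars.splitOn l sep = [[], rest] := by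
  subst h; exact pvSplitOn_prefix sep rest hsep hno

theorem pvSplit?_eq (s : String) (sep rest : List Char) (hsep : sep ≠ []) (hno : ¬ sep <:+: rest)
    (h : s.toList = sep ++ rest) :
    PySem.Str.split? s (String.ofList sep) = some [String.ofList [], String.ofList rest] := by
  have hch : PySem.Chars.split? s.toList (String.ofList sep).toList = some [[], rest] := by
    rw [show (String.ofList sep).toList = sep from by simp, PySem.Chars.split?]
    rw [if_neg (by simp [List.isEmpty_iff, hsep])]
    rw [pvSplitOn_of_eq s.toList sep rest hsep hno h]
  rw [PySem.Str.split?, hch]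
  rfl

theorem remove_common_beginning_spec : Claim_unchanged_remove_common_beginning := by
  intro str1 str2 _ hnD
  show remove_common_beginning str1 str2 = remove_common_beginning_alt str1 str2
  have hk1 := pvLcpLen_le_left str1.toList str2.toList
  have hk2 := pvLcpLen_le_right str1.toList str2.toList
  have hcommon := pvLoopA_eq str1 str2
  have hlen : PySem.Str.len (String.ofList (str1.toList.take (pvLcpLen str1.toList str2.toList)))
      = (pvLcpLen str1.toList str2.toList : Int) := by
    have hk1' : pvLcpLen str1.toList str2.toList ≤ str1.length := by simpa using hk1
    simp [PySem.Str.len]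
    omega
  have ealt : remove_common_beginning_alt str1 str2
      = (String.ofList (str1.toList.drop (pvLcpLen str1.toList str2.toList)),
         String.ofList (str2.toList.drop (pvLcpLen str1.toList str2.toList))) := by
    unfold remove_common_beginning_alt
    refine Prod.ext_iff.mpr ⟨?_, ?_⟩ <;>
      · apply String.toList_injective
        rw [PySem.Str.toList_slice, PySem.Chars.slice_eq_listSlice, PySem.List.slice_from_natCast]
        simp
  unfold remove_common_beginning
  rw [hcommon]
  simp only [hlen, ealt, gt_iff_lt]
  rcases Nat.eq_zero_or_pos (pvLcpLen str1.toList str2.toList) with h0 | hpos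
  · rw [h0]
    norm_num
  · rw [if_pos (show (0 : Int) < ((pvLcpLen str1.toList str2.toList : Nat) : Int) from by exact_mod_cast hpos)]
    have hsepne : str1.toList.take (pvLcpLen str1.toList str2.toList) ≠ [] := by
      intro h
      have hlt := congrArg List.length h
      simp only [List.length_take, List.length_nil] at hlt
      omega
    have hD1 : ¬ str1.toList.take (pvLcpLen str1.toList str2.toList)
        <:+: str1.toList.drop (pvLcpLen str1.toList str2.toList) :=
      fun h => hnD ⟨by rw [pvCommonLen_eq_pvLcpLen]; exact hpos,
        Or.inl (by rw [pvCommonLen_eq_pvLcpLen]; exact h)⟩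
    have hD2 : ¬ str1.toList.take (pvLcpLen str1.toList str2.toList)
        <:+: str2.toList.drop (pvLcpLen str1.toList str2.toList) :=
      fun h => hnD ⟨by rw [pvCommonLen_eq_pvLcpLen]; exact hpos,
        Or.inr (by rw [pvCommonLen_eq_pvLcpLen]; exact h)⟩
    rw [pvSplit?_eq str1 _ _ hsepne hD1 (List.take_append_drop _ _).symm]
    rw [pvSplit?_eq str2 _ _ hsepne hD2
      (by rw [pvLcpLen_take_eq str1.toList str2.toList]; exact (List.take_append_drop _ _).symm)]
    simp

theorem remove_common_beginning_changed : Claim_changed_remove_common_beginning := by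
  unfold Claim_changed_remove_common_beginning; decide

-- go always yields acc.reverse followed by at least one chunk
theorem pvGo_shape (p : List Char) :
    ∀ (fuel : Nat) (l cur : List Char) (acc : List (List Char)),
      ∃ res, PySem.Chars.splitOn.go p fuel l cur acc = acc.reverse ++ res ∧ res ≠ [] := by
  intro fuel
  induction fuel with
  | zero =>
    intro l cur acc
    rw [PySem.Chars.splitOn.go]
    exact ⟨[cur.reverse ++ l], by simp, by simp⟩
  | succ n ih =>
    intro l cur acc
    cases l with
    | nil =>
      rw [PySem.Chars.splitOn.go]
      · exact ⟨[cur.reverse], by simp, by simp⟩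
      · omega
    | cons c rest =>
      rw [PySem.Chars.splitOn.go]
      by_cases hp : p.isPrefixOf (c :: rest) = true
      · rw [hp]
        simp only [if_true]
        obtain ⟨res, heq, hne⟩ := ih (List.drop p.length (c :: rest)) [] (cur.reverse :: acc)
        refine ⟨cur.reverse :: res, ?_, by simp⟩
        rw [heq]
        simp
      · rw [Bool.eq_false_iff.mpr hp]
        simp only [Bool.false_eq_true, if_false]
        exact ih rest (c :: cur) acc
-- (note: the nil branch above uses the conditional equation of go, which carries the side goal n+1 = 0 → False)

-- when sep occurs in l, the first chunk go produces is strictly shorter than l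
theorem pvGo_occur (p : List Char) (hp : p ≠ []) :
    ∀ (fuel : Nat) (l cur : List Char) (acc : List (List Char)), p <:+: l → l.length ≤ fuel →
      ∃ t res, PySem.Chars.splitOn.go p fuel l cur acc = acc.reverse ++ ((cur.reverse ++ t) :: res) ∧
        t.length + p.length ≤ l.length := by
  intro fuel
  induction fuel with
  | zero =>
    intro l cur acc hocc hlen
    have : l = [] := by cases l <;> simp_all
    subst this
    exact absurd (List.eq_nil_of_infix_nil hocc) hp
  | succ n ih =>
    intro l cur acc hocc hlen
    cases l with
    | nil => exact absurd (List.eq_nil_of_infix_nil hocc) hp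
    | cons c rest =>
      rw [PySem.Chars.splitOn.go]
      by_cases hpre : p.isPrefixOf (c :: rest) = true
      · rw [hpre]
        simp only [if_true]
        obtain ⟨res, heq, hne⟩ := pvGo_shape p n (List.drop p.length (c :: rest)) [] (cur.reverse :: acc)
        cases res with
        | nil => exact absurd rfl hne
        | cons r0 res' =>
          refine ⟨[], r0 :: res', ?_, ?_⟩
          · rw [heq]; simp
          · have := (List.isPrefixOf_iff_prefix.mp hpre).length_le
            simpa using this
      · have hpre' : p.isPrefixOf (c :: rest) = false := Bool.eq_false_iff.mpr hpre
        rw [hpre']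
        simp only [Bool.false_eq_true, if_false]
        have hocc' : p <:+: rest := by
          rcases List.infix_cons_iff.mp hocc with h | h
          · exact absurd (List.isPrefixOf_iff_prefix.mpr h) (by simp [hpre'])
          · exact h
        obtain ⟨t, res, heq, hlt⟩ := ih rest (c :: cur) acc hocc' (by simpa using Nat.lt_succ_iff.mp (by simpa using hlen))
        refine ⟨c :: t, res, ?_, by simpa using by omega⟩
        rw [heq]
        simp

-- split on a nonempty prefix that DOES reoccur: the second piece is strictly shorter than the remainder
theorem pvSplitOn_occur (p rest : List Char) (hp : p ≠ []) (hocc : p <:+: rest) :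
    ∃ t res, PySem.Chars.splitOn (p ++ rest) p = [] :: t :: res ∧ t.length < rest.length := by
  obtain ⟨c, sep', rfl⟩ : ∃ c sep', p = c :: sep' := by
    cases p with
    | nil => exact absurd rfl hp
    | cons c sep' => exact ⟨c, sep', rfl⟩
  show ∃ t res, PySem.Chars.splitOn.go _ (((c :: sep') ++ rest).length + 1) _ [] [] = _ ∧ _
  rw [show ((c :: sep') ++ rest : List Char) = c :: (sep' ++ rest) by simp]
  rw [PySem.Chars.splitOn.go]
  have hpref : (c :: sep').isPrefixOf (c :: (sep' ++ rest)) = true := by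
    rw [List.isPrefixOf_iff_prefix]
    exact ⟨rest, by simp⟩
  rw [hpref]
  simp only [if_true, List.reverse_nil]
  have hdrop : List.drop (c :: sep').length (c :: (sep' ++ rest)) = rest := by simp
  rw [hdrop]
  obtain ⟨t, res, heq, hle⟩ := pvGo_occur (c :: sep') hp ((c :: (sep' ++ rest)).length) rest [] [[]]
    hocc (by simp only [List.length_cons, List.length_append]; omega)
  refine ⟨t, res, ?_, ?_⟩
  · rw [heq]; simp
  · have : (c :: sep').length ≥ 1 := by simp
    omega

theorem pvSplitOn_occur_of_eq (l p rest : List Char) (hp : p ≠ []) (hocc : p <:+: rest)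
    (h : l = p ++ rest) :
    ∃ t res, PySem.Chars.splitOn l p = [] :: t :: res ∧ t.length < rest.length := by
  subst h; exact pvSplitOn_occur p rest hp hocc

theorem pvSplit?_some (s : String) (p : List Char) (hp : p ≠ []) :
    PySem.Str.split? s (String.ofList p) = some ((PySem.Chars.splitOn s.toList p).map String.ofList) := by
  rw [PySem.Str.split?, PySem.Chars.split?,
    show (String.ofList p).toList = p from by simp,
    if_neg (by simp [List.isEmpty_iff, hp])]
  rfl

theorem remove_common_beginning_tight : Claim_exact_remove_common_beginning := by
  intro str1 str2 _ hD
  obtain ⟨hpos, hocc⟩ := hD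
  simp only [pvCommonLen_eq_pvLcpLen] at hpos hocc
  have hk1 := pvLcpLen_le_left str1.toList str2.toList
  have hk2 := pvLcpLen_le_right str1.toList str2.toList
  have hcommon := pvLoopA_eq str1 str2
  have hlen : PySem.Str.len (String.ofList (str1.toList.take (pvLcpLen str1.toList str2.toList)))
      = (pvLcpLen str1.toList str2.toList : Int) := by
    have hk1' : pvLcpLen str1.toList str2.toList ≤ str1.length := by simpa using hk1
    simp [PySem.Str.len]
    omega
  have hsepne : str1.toList.take (pvLcpLen str1.toList str2.toList) ≠ [] := by
    intro h
    have hlt := congrArg List.length h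
    simp only [List.length_take, List.length_nil] at hlt
    omega
  have hAdef : remove_common_beginning str1 str2
      = (((PySem.Str.split? str1 (String.ofList (str1.toList.take (pvLcpLen str1.toList str2.toList)))).getD []).getD 1 "",
         ((PySem.Str.split? str2 (String.ofList (str1.toList.take (pvLcpLen str1.toList str2.toList)))).getD []).getD 1 "") := by
    unfold remove_common_beginning
    rw [hcommon]
    simp only [hlen, gt_iff_lt]
    rw [if_pos (show (0 : Int) < ((pvLcpLen str1.toList str2.toList : Nat) : Int) from by exact_mod_cast hpos)]
  have ealt : remove_common_beginning_alt str1 str2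
      = (String.ofList (str1.toList.drop (pvLcpLen str1.toList str2.toList)),
         String.ofList (str2.toList.drop (pvLcpLen str1.toList str2.toList))) := by
    unfold remove_common_beginning_alt
    refine Prod.ext_iff.mpr ⟨?_, ?_⟩ <;>
      · apply String.toList_injective
        rw [PySem.Str.toList_slice, PySem.Chars.slice_eq_listSlice, PySem.List.slice_from_natCast]
        simp
  intro heq
  rw [hAdef, ealt] at heq
  by_cases h1 : str1.toList.take (pvLcpLen str1.toList str2.toList)
      <:+: str1.toList.drop (pvLcpLen str1.toList str2.toList)
  · obtain ⟨t, res, hsp, hlt⟩ := pvSplitOn_occur_of_eq str1.toList _ _ hsepne h1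
      (List.take_append_drop _ _).symm
    have h1' := congrArg (fun q : String × String => q.1.toList.length) heq
    rw [pvSplit?_some str1 _ hsepne] at h1'
    simp only [hsp] at h1'
    simp at h1'
    simp only [List.length_drop] at hlt
    have hL : str1.toList.length = str1.length := by simp
    omega
  · have h2 : str1.toList.take (pvLcpLen str1.toList str2.toList)
        <:+: str2.toList.drop (pvLcpLen str1.toList str2.toList) := by
      rcases hocc with h | h
      · exact absurd h h1
      · exact h
    obtain ⟨t, res, hsp, hlt⟩ := pvSplitOn_occur_of_eq str2.toList _ _ hsepne h2
      (by rw [pvLcpLen_take_eq str1.toList str2.toList]; exact (List.take_append_drop _ _).symm)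
    have h2' := congrArg (fun q : String × String => q.2.toList.length) heq
    rw [pvSplit?_some str2 _ hsepne] at h2'
    simp only [hsp] at h2'
    simp at h2'
    simp only [List.length_drop] at hlt
    have hL : str2.toList.length = str2.length := by simp
    omega
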